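-- pv_equiv track=rewrite | github.com/zetzet7298/grok2api | app/services/grok/utils/tool_call.py | _balance_braces
-- ===== SOURCE A (Python) =====
-- def _balance_braces(text: str) -> str:
--     if not text:
--         return text
--     open_count = 0
--     close_count = 0
--     in_string = False
--     escape = False
--     for ch in text:
--         if escape:
--             escape = False
--             continue
--         if ch == "\\" and in_string:
--             escape = True
--             continue
--         if ch == '"':
--             in_string = not in_string
--             continue
--         if in_string:
--             continue
--         if ch == "{":
--             open_count += 1
--         elif ch == "}":
--             close_count += 1
--     if open_count > close_count:
--         text = text + ("}" * (open_count - close_count))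
--     return text
-- ===== SOURCE B (Python) =====
-- def _balance_braces(text: str) -> str:
--     if not text:
--         return text
--     # Phase 1: collect the structural (outside-string) characters.
--     structural = []
--     it = iter(text)
--     for ch in it:
--         if ch == '"':
--             # consume the quoted string literal entirely
--             for c in it:
--                 if c == '\\':
--                     next(it, None)
--                 elif c == '"':
--                     break
--         else:
--             structural.append(ch)
--     # Phase 2: count braces among the structural characters.
--     diff = structural.count('{') - structural.count('}')
--     return text + '}' * diff if diff > 0 else text
-- ===== Notes on version B (the rewrite author's own statement) =====
-- stated objective: alternative
-- what changed: Replaces A's single pass with four mutable state flags (in_string/escape plus two counters) by a two-phase decomposition: first strip out all quoted string literals (a nested loop that consumes each string, handling escapes locally), then count the braces in the remaining structural text.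
import Mathlib
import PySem

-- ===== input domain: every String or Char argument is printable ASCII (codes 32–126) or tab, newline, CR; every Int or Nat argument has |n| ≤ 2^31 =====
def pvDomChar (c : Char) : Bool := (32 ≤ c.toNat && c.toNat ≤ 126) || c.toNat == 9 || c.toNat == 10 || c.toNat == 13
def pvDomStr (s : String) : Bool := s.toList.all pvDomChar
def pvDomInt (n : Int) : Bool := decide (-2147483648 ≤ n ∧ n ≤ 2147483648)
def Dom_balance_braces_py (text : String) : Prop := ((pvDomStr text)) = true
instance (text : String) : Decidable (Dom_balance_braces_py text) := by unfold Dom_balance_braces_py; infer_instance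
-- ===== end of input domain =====

-- B replaces A's single character loop with four state flags by a two-phase
-- decomposition (strip out quoted string literals, then count braces); same
-- return value, similar cost ("alternative" objective).

-- ===== PORT A =====
-- the for-loop of A, state = (open_count, close_count, in_string, escape), branches in source order
def loopA : List Char → Int → Int → Bool → Bool → Int × Int × Bool × Bool
  | [], o, c, instr, esc => (o, c, instr, esc)
  | ch :: rest, o, c, instr, esc =>
    if esc then loopA rest o c instr false
    else if ch = '\\' && instr then loopA rest o c instr true
    else if ch = '"' then loopA rest o c (!instr) esc
    else if instr then loopA rest o c instr esc
    else if ch = '{' then loopA rest (o + 1) c instr esc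
    else if ch = '}' then loopA rest o (c + 1) instr esc
    else loopA rest o c instr esc

def balance_braces_py (text : String) : String :=
  if text = "" then text
  else
    let r := loopA text.toList 0 0 false false
    let o := r.1
    let c := r.2.1
    if o > c then text ++ String.ofList (List.replicate (o - c).toNat '}') else text

-- ===== PORT B =====
-- the inner 'for c in it' loop of B: consume a quoted string literal, return the rest
def skipStr : List Char → List Char
  | [] => []
  | '"' :: rest => rest
  | '\\' :: [] => []
  | '\\' :: _ :: rest => skipStr rest
  | _ :: rest => skipStr rest

theorem skipStr_length : ∀ l : List Char, (skipStr l).length ≤ l.length := by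
  intro l
  induction l using skipStr.induct <;> simp [skipStr] <;> omega

-- the outer loop of B: keep structural characters, skipping quoted strings
def stripStr : List Char → List Char
  | [] => []
  | c :: rest =>
    if c = '"' then stripStr (skipStr rest)
    else c :: stripStr rest
termination_by l => l.length
decreasing_by
  · simpa using Nat.lt_succ_of_le (skipStr_length rest)
  · simp

def balance_braces_py_alt (text : String) : String :=
  if text = "" then text
  else
    let structural := stripStr text.toList
    let diff : Int := (structural.count '{' : Int) - (structural.count '}' : Int)
    if diff > 0 then text ++ String.ofList (List.replicate diff.toNat '}') else text

-- ===== PRECONDITION & SPEC =====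
def Spec_balance_braces_py (text : String) (out : String) : Prop := out = balance_braces_py_alt text
instance (text : String) (out : String) : Decidable (Spec_balance_braces_py text out) := by unfold Spec_balance_braces_py; infer_instance

-- ===== CLAIM (what is proved, stated in full; the proofs are below) =====
def Claim_equal_balance_braces_py : Prop := ∀ (text : String), Dom_balance_braces_py text → Spec_balance_braces_py text (balance_braces_py text)

-- ===== LEMMAS AND PROOFS =====

-- inside a string, A's loop behaves like running the loop on skipStr's remainder in neutral state
theorem loopA_in : ∀ (l : List Char) (o c : Int),
    ((loopA l o c true false).1, (loopA l o c true false).2.1)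
      = ((loopA (skipStr l) o c false false).1, (loopA (skipStr l) o c false false).2.1) := by
  intro l
  induction l using skipStr.induct with
  | case1 => intro o c; simp [skipStr, loopA]
  | case2 rest => intro o c; simp [skipStr, loopA]
  | case3 => intro o c; simp [skipStr, loopA]
  | case4 head rest ih => intro o c; simpa [skipStr, loopA] using ih o c
  | case5 head rest hq hb1 hb2 ih =>
      intro o c
      have hq' : ¬ head = '"' := hq
      have hbs : ¬ head = '\\' := by
        intro h
        cases rest with
        | nil => exact hb1 h rfl
        | cons a b => exact hb2 a b h rfl
      simp only [skipStr, loopA]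
      simp only [hq', hbs, if_false]
      simpa [loopA, hq', hbs] using ih o c

-- outside a string, A's loop counts exactly the braces of stripStr
theorem loopA_out : ∀ (l : List Char) (o c : Int),
    ((loopA l o c false false).1, (loopA l o c false false).2.1)
      = (o + ((stripStr l).count '{' : Int), c + ((stripStr l).count '}' : Int)) := by
  intro l
  induction l using stripStr.induct with
  | case1 => intro o c; simp [stripStr, loopA]
  | case2 rest ih =>
      intro o c
      rw [show loopA ('"' :: rest) o c false false = loopA rest o c true false by
            simp [loopA]]
      rw [show stripStr ('"' :: rest) = stripStr (skipStr rest) by simp [stripStr]]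
      rw [loopA_in rest o c]
      exact ih o c
  | case3 ch rest hq ih =>
      intro o c
      rw [show stripStr (ch :: rest) = ch :: stripStr rest by simp [stripStr, hq]]
      by_cases ho : ch = '{'
      · subst ho
        obtain ⟨h1, h2⟩ := Prod.mk.injEq .. ▸ ih (o + 1) c
        simp [loopA]
        omega
      · by_cases hc : ch = '}'
        · subst hc
          obtain ⟨h1, h2⟩ := Prod.mk.injEq .. ▸ ih o (c + 1)
          simp [loopA]
          omega
        · have := Prod.mk.injEq .. ▸ ih o c
          simp [loopA, hq, ho, hc]
          exact this

-- ===== VERDICT (by name: the statement is the Claim_ definition above) =====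
theorem balance_braces_py_spec : Claim_equal_balance_braces_py := by
  intro text _
  unfold Spec_balance_braces_py balance_braces_py balance_braces_py_alt
  by_cases he : text = ""
  · simp [he]
  · simp only [he, if_false]
    have h := loopA_out text.toList 0 0
    rw [Prod.mk.injEq] at h
    rw [h.1, h.2]
    by_cases hgt : (0 : Int) + ((stripStr text.toList).count '{' : Int) > 0 + ((stripStr text.toList).count '}' : Int)
    · rw [if_pos hgt, if_pos (by omega)]
      norm_num
    · rw [if_neg hgt, if_neg (by omega)]
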